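-- pv_equiv track=rewrite | github.com/ChuTIen18/Demo2_Python | solverawdata.py | guess_emotion_and_context
-- ===== SOURCE A (Python) =====
-- from typing import Tuple, List, Optional
--
-- def guess_emotion_and_context(lyrics: str, tags: List[str]) -> Tuple[str, str]:
--     txt = (lyrics or "").lower()
--     tset = set(x.lower() for x in (tags or []))
--
--     emo = []
--     if any(w in txt for w in ["love", "darling", "kiss", "heart"]) or "love" in tset:
--         emo.append("romantic")
--     if any(w in txt for w in ["sad", "lonely", "tears", "cry", "broken"]):
--         emo.append("melancholic")
--     if any(w in txt for w in ["dance", "party", "club", "night"]) or any(w in tset for w in ["dance", "edm", "club"]):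
--         emo.append("energetic")
--     if any(w in txt for w in ["remember", "years", "time", "memories"]) or "nostalgia" in tset:
--         emo.append("nostalgic")
--     if not emo:
--         emo = ["mixed"]
--
--     ctx = []
--     if any(w in tset for w in ["acoustic", "chill", "lofi"]) or any(w in txt for w in ["slow", "acoustic", "quiet"]):
--         ctx.append("relaxing / late night / studying")
--     if any(w in txt for w in ["dance", "party", "club", "workout"]):
--         ctx.append("party / workout / night out")
--     if any(w in txt for w in ["road", "drive", "highway", "mile"]):
--         ctx.append("road trips / long drives")
--     if not ctx:
--         ctx = ["general listening"]
--
--     return ", ".join(emo), ", ".join(ctx)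
-- ===== SOURCE B (Python) =====
-- # Bitmask re-implementation: one flat keyword->label-bitmask table, a single
-- # accumulating integer mask, then a decode phase per label range.
-- LABELS = [
--     "romantic", "melancholic", "energetic", "nostalgic",
--     "relaxing / late night / studying",
--     "party / workout / night out",
--     "road trips / long drives",
-- ]
--
-- TEXT_BITS = [
--     ("love", 1), ("darling", 1), ("kiss", 1), ("heart", 1),
--     ("sad", 2), ("lonely", 2), ("tears", 2), ("cry", 2), ("broken", 2),
--     ("dance", 4 | 32), ("party", 4 | 32), ("club", 4 | 32), ("night", 4),
--     ("workout", 32),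
--     ("remember", 8), ("years", 8), ("time", 8), ("memories", 8),
--     ("slow", 16), ("acoustic", 16), ("quiet", 16),
--     ("road", 64), ("drive", 64), ("highway", 64), ("mile", 64),
-- ]
--
-- TAG_BITS = [
--     ("love", 1), ("dance", 4), ("edm", 4), ("club", 4), ("nostalgia", 8),
--     ("acoustic", 16), ("chill", 16), ("lofi", 16),
-- ]
--
-- def guess_emotion_and_context(lyrics, tags):
--     txt = (lyrics or "").lower()
--     tset = set(x.lower() for x in (tags or []))
--     mask = 0
--     for kw, b in TEXT_BITS:
--         if kw in txt:
--             mask |= b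
--     for kw, b in TAG_BITS:
--         if kw in tset:
--             mask |= b
--     emo = [LABELS[i] for i in range(4) if (mask >> i) & 1] or ["mixed"]
--     ctx = [LABELS[i] for i in range(4, 7) if (mask >> i) & 1] or ["general listening"]
--     return ", ".join(emo), ", ".join(ctx)
-- ===== Notes on version B (the rewrite author's own statement) =====
-- stated objective: alternative
-- what changed: Replaces the eight per-label if/append branches by a keyword-major pass: a flat keyword-to-label-bitmask table is scanned once accumulating one integer mask, which a separate decode phase turns into the two label lists (with fallbacks).
import Mathlib
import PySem

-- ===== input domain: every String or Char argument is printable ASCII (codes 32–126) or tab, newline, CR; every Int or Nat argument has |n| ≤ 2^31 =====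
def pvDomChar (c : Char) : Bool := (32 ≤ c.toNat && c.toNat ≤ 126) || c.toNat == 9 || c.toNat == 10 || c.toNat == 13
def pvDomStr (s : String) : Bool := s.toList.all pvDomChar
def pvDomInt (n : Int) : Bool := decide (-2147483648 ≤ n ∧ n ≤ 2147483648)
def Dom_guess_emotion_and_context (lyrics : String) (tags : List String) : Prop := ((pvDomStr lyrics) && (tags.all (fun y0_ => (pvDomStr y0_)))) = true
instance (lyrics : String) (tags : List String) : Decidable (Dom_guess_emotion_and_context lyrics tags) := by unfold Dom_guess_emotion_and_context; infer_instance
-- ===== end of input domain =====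

-- B replaces A's eight per-label if/append branches by a keyword-major scan over a flat
-- keyword→label-bitmask table accumulating one integer mask, then a decode phase; objective: alternative.

-- ===== PORT A =====
def guess_emotion_and_context (lyrics : String) (tags : List String) : String × String :=
  -- 'lyrics or ""' is lyrics itself when nonempty and "" otherwise; .lower of either is .lower lyrics
  let txt := PySem.Str.lower lyrics
  let tset : PySem.Set String := PySem.Set.ofList (tags.map PySem.Str.lower)
  let emo : List String := []
  let emo := if ["love", "darling", "kiss", "heart"].any (fun w => PySem.Str.isIn w txt)
                || PySem.Set.contains tset "love" then emo ++ ["romantic"] else emo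
  let emo := if ["sad", "lonely", "tears", "cry", "broken"].any (fun w => PySem.Str.isIn w txt)
             then emo ++ ["melancholic"] else emo
  let emo := if ["dance", "party", "club", "night"].any (fun w => PySem.Str.isIn w txt)
                || ["dance", "edm", "club"].any (fun w => PySem.Set.contains tset w)
             then emo ++ ["energetic"] else emo
  let emo := if ["remember", "years", "time", "memories"].any (fun w => PySem.Str.isIn w txt)
                || PySem.Set.contains tset "nostalgia" then emo ++ ["nostalgic"] else emo
  let emo := if emo.isEmpty then ["mixed"] else emo
  let ctx : List String := []
  let ctx := if ["acoustic", "chill", "lofi"].any (fun w => PySem.Set.contains tset w)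
                || ["slow", "acoustic", "quiet"].any (fun w => PySem.Str.isIn w txt)
             then ctx ++ ["relaxing / late night / studying"] else ctx
  let ctx := if ["dance", "party", "club", "workout"].any (fun w => PySem.Str.isIn w txt)
             then ctx ++ ["party / workout / night out"] else ctx
  let ctx := if ["road", "drive", "highway", "mile"].any (fun w => PySem.Str.isIn w txt)
             then ctx ++ ["road trips / long drives"] else ctx
  let ctx := if ctx.isEmpty then ["general listening"] else ctx
  (PySem.Str.join ", " emo, PySem.Str.join ", " ctx)

-- ===== PORT B =====
def pvLabels : List String :=
  ["romantic", "melancholic", "energetic", "nostalgic",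
   "relaxing / late night / studying",
   "party / workout / night out",
   "road trips / long drives"]

def pvTextBits : List (String × Nat) :=
  [("love", 1), ("darling", 1), ("kiss", 1), ("heart", 1),
   ("sad", 2), ("lonely", 2), ("tears", 2), ("cry", 2), ("broken", 2),
   ("dance", 36), ("party", 36), ("club", 36), ("night", 4),
   ("workout", 32),
   ("remember", 8), ("years", 8), ("time", 8), ("memories", 8),
   ("slow", 16), ("acoustic", 16), ("quiet", 16),
   ("road", 64), ("drive", 64), ("highway", 64), ("mile", 64)]

def pvTagBits : List (String × Nat) :=
  [("love", 1), ("dance", 4), ("edm", 4), ("club", 4), ("nostalgia", 8),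
   ("acoustic", 16), ("chill", 16), ("lofi", 16)]

-- loop body of Source B's 'for kw, b in …: if cond(kw): mask |= b'
def pvStep (cond : String → Bool) (m : Nat) (p : String × Nat) : Nat :=
  if cond p.1 then m ||| p.2 else m

-- '(mask >> i) & 1' truthiness
def pvBit (m i : Nat) : Bool := (m >>> i) % 2 == 1

def guess_emotion_and_context_alt (lyrics : String) (tags : List String) : String × String :=
  let txt := PySem.Str.lower lyrics
  let tset : PySem.Set String := PySem.Set.ofList (tags.map PySem.Str.lower)
  let mask := pvTextBits.foldl (pvStep (fun kw => PySem.Str.isIn kw txt)) 0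
  let mask := pvTagBits.foldl (pvStep (fun kw => PySem.Set.contains tset kw)) mask
  let emo := ((List.range' 0 4).filter (fun i => pvBit mask i)).map (fun i => pvLabels.getD i "")
  let emo := if emo.isEmpty then ["mixed"] else emo
  let ctx := ((List.range' 4 3).filter (fun i => pvBit mask i)).map (fun i => pvLabels.getD i "")
  let ctx := if ctx.isEmpty then ["general listening"] else ctx
  (PySem.Str.join ", " emo, PySem.Str.join ", " ctx)

-- ===== PRECONDITION & SPEC =====
def Spec_guess_emotion_and_context (lyrics : String) (tags : List String) (out : String × String) : Prop := out = guess_emotion_and_context_alt lyrics tags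
instance (lyrics : String) (tags : List String) (out : String × String) : Decidable (Spec_guess_emotion_and_context lyrics tags out) := by unfold Spec_guess_emotion_and_context; infer_instance

-- ===== CLAIM (what is proved, stated in full; the proofs are below) =====
def Claim_equal_guess_emotion_and_context : Prop := ∀ (lyrics : String) (tags : List String), Dom_guess_emotion_and_context lyrics tags → Spec_guess_emotion_and_context lyrics tags (guess_emotion_and_context lyrics tags)

-- ===== LEMMAS AND PROOFS =====
theorem pvBit_eq_testBit (m i : Nat) : pvBit m i = Nat.testBit m i := by
  unfold pvBit Nat.testBit
  rcases Nat.mod_two_eq_zero_or_one (m >>> i) with h | h <;> simp [h]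

theorem pvBit_lor (m b i : Nat) : pvBit (m ||| b) i = (pvBit m i || pvBit b i) := by
  simp [pvBit_eq_testBit, Nat.testBit_or]

theorem pvBit_foldl (cond : String → Bool) (l : List (String × Nat)) (m0 i : Nat) :
    pvBit (l.foldl (pvStep cond) m0) i
      = (pvBit m0 i || l.any (fun p => cond p.1 && pvBit p.2 i)) := by
  induction l generalizing m0 with
  | nil => simp
  | cons p l ih =>
    simp only [List.foldl_cons, List.any_cons, ih, pvStep]
    by_cases h : cond p.1 <;> simp [h, pvBit_lor, Bool.or_assoc]

theorem pv_mask_bit (txt : String) (tset : PySem.Set String) (i : Nat) :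
    pvBit (pvTagBits.foldl (pvStep (fun kw => PySem.Set.contains tset kw))
            (pvTextBits.foldl (pvStep (fun kw => PySem.Str.isIn kw txt)) 0)) i
      = (pvTextBits.any (fun p => PySem.Str.isIn p.1 txt && pvBit p.2 i)
          || pvTagBits.any (fun p => PySem.Set.contains tset p.1 && pvBit p.2 i)) := by
  rw [pvBit_foldl, pvBit_foldl]
  have h0 : pvBit 0 i = false := by simp [pvBit]
  rw [h0]
  simp

theorem pv_bit0 (txt : String) (tset : PySem.Set String) :
    pvBit (pvTagBits.foldl (pvStep (fun kw => PySem.Set.contains tset kw))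
            (pvTextBits.foldl (pvStep (fun kw => PySem.Str.isIn kw txt)) 0)) 0
      = (["love", "darling", "kiss", "heart"].any (fun w => PySem.Str.isIn w txt)
          || PySem.Set.contains tset "love") := by
  rw [pv_mask_bit]
  simp [pvTextBits, pvTagBits, pvBit, Bool.or_assoc]

theorem pv_bit1 (txt : String) (tset : PySem.Set String) :
    pvBit (pvTagBits.foldl (pvStep (fun kw => PySem.Set.contains tset kw))
            (pvTextBits.foldl (pvStep (fun kw => PySem.Str.isIn kw txt)) 0)) 1
      = ["sad", "lonely", "tears", "cry", "broken"].any (fun w => PySem.Str.isIn w txt) := by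
  rw [pv_mask_bit]
  simp [pvTextBits, pvTagBits, pvBit, Bool.or_assoc]

theorem pv_bit2 (txt : String) (tset : PySem.Set String) :
    pvBit (pvTagBits.foldl (pvStep (fun kw => PySem.Set.contains tset kw))
            (pvTextBits.foldl (pvStep (fun kw => PySem.Str.isIn kw txt)) 0)) 2
      = (["dance", "party", "club", "night"].any (fun w => PySem.Str.isIn w txt)
          || ["dance", "edm", "club"].any (fun w => PySem.Set.contains tset w)) := by
  rw [pv_mask_bit]
  simp [pvTextBits, pvTagBits, pvBit, Bool.or_assoc]

theorem pv_bit3 (txt : String) (tset : PySem.Set String) :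
    pvBit (pvTagBits.foldl (pvStep (fun kw => PySem.Set.contains tset kw))
            (pvTextBits.foldl (pvStep (fun kw => PySem.Str.isIn kw txt)) 0)) 3
      = (["remember", "years", "time", "memories"].any (fun w => PySem.Str.isIn w txt)
          || PySem.Set.contains tset "nostalgia") := by
  rw [pv_mask_bit]
  simp [pvTextBits, pvTagBits, pvBit, Bool.or_assoc]

theorem pv_bit4 (txt : String) (tset : PySem.Set String) :
    pvBit (pvTagBits.foldl (pvStep (fun kw => PySem.Set.contains tset kw))
            (pvTextBits.foldl (pvStep (fun kw => PySem.Str.isIn kw txt)) 0)) 4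
      = (["slow", "acoustic", "quiet"].any (fun w => PySem.Str.isIn w txt)
          || ["acoustic", "chill", "lofi"].any (fun w => PySem.Set.contains tset w)) := by
  rw [pv_mask_bit]
  simp [pvTextBits, pvTagBits, pvBit, Bool.or_assoc]

theorem pv_bit5 (txt : String) (tset : PySem.Set String) :
    pvBit (pvTagBits.foldl (pvStep (fun kw => PySem.Set.contains tset kw))
            (pvTextBits.foldl (pvStep (fun kw => PySem.Str.isIn kw txt)) 0)) 5
      = ["dance", "party", "club", "workout"].any (fun w => PySem.Str.isIn w txt) := by
  rw [pv_mask_bit]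
  simp [pvTextBits, pvTagBits, pvBit, Bool.or_assoc]

theorem pv_bit6 (txt : String) (tset : PySem.Set String) :
    pvBit (pvTagBits.foldl (pvStep (fun kw => PySem.Set.contains tset kw))
            (pvTextBits.foldl (pvStep (fun kw => PySem.Str.isIn kw txt)) 0)) 6
      = ["road", "drive", "highway", "mile"].any (fun w => PySem.Str.isIn w txt) := by
  rw [pv_mask_bit]
  simp [pvTextBits, pvTagBits, pvBit, Bool.or_assoc]

theorem pv_emo_eq (txt : String) (tset : PySem.Set String) :
    (let emo : List String := []
     let emo := if ["love", "darling", "kiss", "heart"].any (fun w => PySem.Str.isIn w txt)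
                   || PySem.Set.contains tset "love" then emo ++ ["romantic"] else emo
     let emo := if ["sad", "lonely", "tears", "cry", "broken"].any (fun w => PySem.Str.isIn w txt)
                then emo ++ ["melancholic"] else emo
     let emo := if ["dance", "party", "club", "night"].any (fun w => PySem.Str.isIn w txt)
                   || ["dance", "edm", "club"].any (fun w => PySem.Set.contains tset w)
                then emo ++ ["energetic"] else emo
     let emo := if ["remember", "years", "time", "memories"].any (fun w => PySem.Str.isIn w txt)
                   || PySem.Set.contains tset "nostalgia" then emo ++ ["nostalgic"] else emo
     if emo.isEmpty then ["mixed"] else emo)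
    = (let mask := pvTagBits.foldl (pvStep (fun kw => PySem.Set.contains tset kw))
                     (pvTextBits.foldl (pvStep (fun kw => PySem.Str.isIn kw txt)) 0)
       let emo := ((List.range' 0 4).filter (fun i => pvBit mask i)).map (fun i => pvLabels.getD i "")
       if emo.isEmpty then ["mixed"] else emo) := by
  simp only [show (List.range' 0 4) = [0, 1, 2, 3] from rfl, List.filter_cons, List.filter_nil,
    pv_bit0 txt tset, pv_bit1 txt tset, pv_bit2 txt tset, pv_bit3 txt tset]
  cases hc1 : (["love", "darling", "kiss", "heart"].any (fun w => PySem.Str.isIn w txt)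
      || PySem.Set.contains tset "love") <;>
  cases hc2 : (["sad", "lonely", "tears", "cry", "broken"].any (fun w => PySem.Str.isIn w txt)) <;>
  cases hc3 : (["dance", "party", "club", "night"].any (fun w => PySem.Str.isIn w txt)
      || ["dance", "edm", "club"].any (fun w => PySem.Set.contains tset w)) <;>
  cases hc4 : (["remember", "years", "time", "memories"].any (fun w => PySem.Str.isIn w txt)
      || PySem.Set.contains tset "nostalgia") <;>
  simp [pvLabels]

theorem pv_ctx_eq (txt : String) (tset : PySem.Set String) :
    (let ctx : List String := []
     let ctx := if ["acoustic", "chill", "lofi"].any (fun w => PySem.Set.contains tset w)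
                   || ["slow", "acoustic", "quiet"].any (fun w => PySem.Str.isIn w txt)
                then ctx ++ ["relaxing / late night / studying"] else ctx
     let ctx := if ["dance", "party", "club", "workout"].any (fun w => PySem.Str.isIn w txt)
                then ctx ++ ["party / workout / night out"] else ctx
     let ctx := if ["road", "drive", "highway", "mile"].any (fun w => PySem.Str.isIn w txt)
                then ctx ++ ["road trips / long drives"] else ctx
     if ctx.isEmpty then ["general listening"] else ctx)
    = (let mask := pvTagBits.foldl (pvStep (fun kw => PySem.Set.contains tset kw))
                     (pvTextBits.foldl (pvStep (fun kw => PySem.Str.isIn kw txt)) 0)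
       let ctx := ((List.range' 4 3).filter (fun i => pvBit mask i)).map (fun i => pvLabels.getD i "")
       if ctx.isEmpty then ["general listening"] else ctx) := by
  rw [Bool.or_comm (["acoustic", "chill", "lofi"].any fun w => PySem.Set.contains tset w)]
  simp only [show (List.range' 4 3) = [4, 5, 6] from rfl, List.filter_cons, List.filter_nil,
    pv_bit4 txt tset, pv_bit5 txt tset, pv_bit6 txt tset]
  cases hc1 : (["slow", "acoustic", "quiet"].any (fun w => PySem.Str.isIn w txt)
      || ["acoustic", "chill", "lofi"].any (fun w => PySem.Set.contains tset w)) <;>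
  cases hc2 : (["dance", "party", "club", "workout"].any (fun w => PySem.Str.isIn w txt)) <;>
  cases hc3 : (["road", "drive", "highway", "mile"].any (fun w => PySem.Str.isIn w txt)) <;>
  simp [pvLabels]

-- ===== VERDICT (by name: the statement is the Claim_ definition above) =====
theorem guess_emotion_and_context_spec : Claim_equal_guess_emotion_and_context := by
  intro lyrics tags _
  exact congrArg₂ Prod.mk
    (congrArg (PySem.Str.join ", ")
      (pv_emo_eq (PySem.Str.lower lyrics) (PySem.Set.ofList (tags.map PySem.Str.lower))))
    (congrArg (PySem.Str.join ", ")
      (pv_ctx_eq (PySem.Str.lower lyrics) (PySem.Set.ofList (tags.map PySem.Str.lower))))
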